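-- pv_equiv track=rewrite | github.com/KamilDemel/LeetCode-Grind | LeetCode/Smallest Palindromic Rearrangement I.py | f_optimized
-- ===== SOURCE A (Python) =====
-- from collections import Counter
-- import string
--
-- def f_optimized(s):
--     n = len(s)
--     mid = n // 2
--     word = s[:mid]
--     ctr = Counter(word)
--     napis = ""
--     for char in string.ascii_lowercase:
--         if char in ctr:
--             ile = ctr[char]
--             napis += ile * char
--     if n % 2 == 0:
--         return napis + napis[::-1]
--     else:
--         return napis + s[mid] + napis[::-1]
-- ===== SOURCE B (Python) =====
-- def f_optimized(s):
--     n = len(s)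
--     mid = n // 2
--     half = "".join(sorted(c for c in s[:mid] if 'a' <= c <= 'z'))
--     if n % 2:
--         return half + s[mid] + half[::-1]
--     return half + half[::-1]
-- ===== Notes on version B (the rewrite author's own statement) =====
-- stated objective: idiomatic
-- what changed: Replaces the Counter-plus-alphabet-scan counting sort of the first half with a direct comparison sort of the filtered lowercase characters via sorted().
import Mathlib
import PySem

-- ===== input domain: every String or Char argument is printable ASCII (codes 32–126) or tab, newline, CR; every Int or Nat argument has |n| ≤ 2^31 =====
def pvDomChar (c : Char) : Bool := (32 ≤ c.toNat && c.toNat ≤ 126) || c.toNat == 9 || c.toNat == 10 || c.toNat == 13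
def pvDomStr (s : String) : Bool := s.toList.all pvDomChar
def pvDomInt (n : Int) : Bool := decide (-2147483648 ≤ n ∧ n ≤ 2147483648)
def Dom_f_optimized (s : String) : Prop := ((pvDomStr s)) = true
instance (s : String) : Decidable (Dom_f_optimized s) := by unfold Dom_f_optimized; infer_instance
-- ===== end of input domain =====

-- B replaces A's Counter + ascii_lowercase counting-sort scan by directly sorting the
-- filtered lowercase characters of the first half (idiomatic; same return value).

-- ===== PORT A =====
-- string.ascii_lowercase
def pvAsciiLowercase : List Char :=
  ['a','b','c','d','e','f','g','h','i','j','k','l','m','n','o','p','q','r','s','t','u','v','w','x','y','z']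

def f_optimized (s : String) : String :=
  let cs := s.toList
  let n : Int := PySem.Str.len s
  let mid : Int := PySem.Int.floordiv n 2
  let word : List Char := PySem.List.slice cs none (some mid)
  let ctr : PySem.Dict Char Int := PySem.Dict.counter word
  let napis : List Char := pvAsciiLowercase.foldl
    (fun acc c => if ctr.contains c then acc ++ PySem.List.pyRepeat [c] (ctr.getD c 0) else acc) []
  if PySem.Int.mod n 2 = 0 then
    String.ofList (napis ++ napis.reverse)
  else
    match PySem.List.pyGet? cs mid with
    | some c => String.ofList (napis ++ [c] ++ napis.reverse)   -- s[mid]: in range whenever n is odd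
    | none => ""                                            -- unreachable (IndexError cannot occur)

-- ===== PORT B =====
def f_optimized_alt (s : String) : String :=
  let cs := s.toList
  let n : Int := PySem.Str.len s
  let mid : Int := PySem.Int.floordiv n 2
  let half : List Char := PySem.List.sorted
    ((PySem.List.slice cs none (some mid)).filter (fun c => 'a' ≤ c && c ≤ 'z')) (fun c => c)
  if PySem.Int.mod n 2 ≠ 0 then
    match PySem.List.pyGet? cs mid with
    | some c => String.ofList (half ++ [c] ++ half.reverse)     -- s[mid]: in range whenever n is odd
    | none => ""                                            -- unreachable (IndexError cannot occur)
  else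
    String.ofList (half ++ half.reverse)

-- ===== PRECONDITION & SPEC =====
def Spec_f_optimized (s : String) (out : String) : Prop := out = f_optimized_alt s
instance (s : String) (out : String) : Decidable (Spec_f_optimized s out) := by unfold Spec_f_optimized; infer_instance

-- ===== CLAIM (what is proved, stated in full; the proofs are below) =====
def Claim_equal_f_optimized : Prop := ∀ (s : String), Dom_f_optimized s → Spec_f_optimized s (f_optimized s)

-- ===== LEMMAS AND PROOFS =====

lemma mem_ascii (c : Char) : c ∈ pvAsciiLowercase ↔ ('a' ≤ c ∧ c ≤ 'z') := by
  constructor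
  · intro h; fin_cases h <;> exact ⟨by decide, by decide⟩
  · rintro ⟨h1, h2⟩
    have hl : 97 ≤ c.toNat := by
      simpa [Char.le_def, UInt32.le_iff_toNat_le] using h1
    have hr : c.toNat ≤ 122 := by
      simpa [Char.le_def, UInt32.le_iff_toNat_le] using h2
    rw [← Char.ofNat_toNat c]
    set n := c.toNat with hn
    clear_value n
    interval_cases n <;> decide
lemma sum_map_ite (k : Char → Nat) (a : Char) (l : List Char) (h : l.Nodup) :
    (l.map (fun c => if (c == a) = true then k c else 0)).sum = if a ∈ l then k a else 0 := by
  induction l with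
  | nil => simp
  | cons b t ih =>
    rcases List.nodup_cons.mp h with ⟨hb, ht⟩
    simp only [List.map_cons, List.sum_cons, ih ht, List.mem_cons]
    by_cases hba : b = a
    · subst hba
      simp [hb]
    · simp [hba, Ne.symm hba, beq_iff_eq]
lemma pairwise_flatMap_replicate (k : Char → Nat) (l : List Char) (h : l.Pairwise (· < ·)) :
    (l.flatMap fun c => List.replicate (k c) c).Pairwise (· ≤ ·) := by
  induction l with
  | nil => simp
  | cons b t ih =>
    rcases List.pairwise_cons.mp h with ⟨hb, ht⟩
    simp only [List.flatMap_cons]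
    apply List.pairwise_append.mpr
    refine ⟨?_, ih ht, ?_⟩
    · exact List.pairwise_replicate.mpr (Or.inr le_rfl)
    · intro x hx y hy
      obtain rfl := List.eq_of_mem_replicate hx
      rcases List.mem_flatMap.mp hy with ⟨d, hd, hyd⟩
      rw [List.eq_of_mem_replicate hyd]
      exact le_of_lt (hb d hd)
lemma counting_eq_sorted (w : List Char) :
    pvAsciiLowercase.foldl
      (fun acc c => if (PySem.Dict.counter w).contains c then
          acc ++ PySem.List.pyRepeat [c] ((PySem.Dict.counter w).getD c 0) else acc) []
    = PySem.List.sorted (w.filter (fun c => 'a' ≤ c && c ≤ 'z')) (fun c => c) := by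
  have hstep : (fun (acc : List Char) c => if (PySem.Dict.counter w).contains c then
        acc ++ PySem.List.pyRepeat [c] ((PySem.Dict.counter w).getD c 0) else acc)
      = fun acc c => acc ++ List.replicate (w.count c) c := by
    funext acc c
    rw [PySem.Dict.contains_counter, PySem.Dict.getD_counter, PySem.List.pyRepeat_singleton]
    simp only [Int.toNat_natCast]
    by_cases hm : w.contains c
    · rw [if_pos hm]
    · have h0 : List.count c w = 0 := by
        rw [List.count_eq_zero]
        intro hcw
        exact hm (List.contains_iff_mem.mpr hcw)
      rw [if_neg hm, h0]
      simp
  rw [hstep, PySem.List.foldl_append_eq_flatMap, List.nil_append]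
  symm
  apply PySem.List.sorted_id_eq_of_perm_of_pairwise
  · apply List.perm_iff_count.mpr
    intro a
    rw [List.flatMap_def, List.count_flatten, List.map_map]
    have : (List.count a ∘ fun c => List.replicate (w.count c) c)
        = fun c => if (c == a) = true then w.count c else 0 := by
      funext c; simp [List.count_replicate]
    rw [this, sum_map_ite _ _ _ (by decide)]
    by_cases ha : ('a' ≤ a ∧ a ≤ 'z')
    · rw [if_pos ((mem_ascii a).mpr ha), List.count_filter (by simp [ha.1, ha.2])]
    · rw [if_neg (fun hmem => ha ((mem_ascii a).mp hmem))]
      symm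
      rw [List.count_eq_zero]
      intro hmem
      rcases List.mem_filter.mp hmem with ⟨_, hpa⟩
      exact ha (by simpa using hpa)
  · exact pairwise_flatMap_replicate _ _ (by decide)
-- ===== VERDICT (by name: the statement is the Claim_ definition above) =====
theorem f_optimized_spec : Claim_equal_f_optimized := by
  intro s _
  unfold Spec_f_optimized f_optimized f_optimized_alt
  simp only [counting_eq_sorted]
  rcases Int.emod_two_eq_zero_or_one (s.length : Int) with h | h <;>
    simp [h, Int.dvd_iff_emod_eq_zero]
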